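-- pv_equiv track=rewrite | github.com/rawi124/fonctionsUtilesCrypto | tt_matrice.py | gen_circulante
-- ===== SOURCE A (Python) =====
-- def gen_circulante(k,t) :
--     n = t - 1
--     i = 1
--     l = [k]+[0]*n
--     while i < t :
--         if k & 1 == 1 :
--             k = k >> 1
--             s = 1 << n
--             k=k^s
--         else :
--             k = k >> 1
--         l[i]=k
--         i = i + 1
--     return l
-- ===== SOURCE B (Python) =====
-- def gen_circulante(k, t):
--     return [k] + [(k >> i) ^ ((k & ((1 << i) - 1)) << (t - i)) for i in range(1, t)]
-- ===== Notes on version B (the rewrite author's own statement) =====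
-- stated objective: alternative
-- what changed: Each rotated element is computed directly from the original k by a closed per-index formula ((k>>i) ^ (low i bits << (t-i))) in a list comprehension, instead of threading a mutated k through a while loop that writes into a pre-allocated list.
import Mathlib
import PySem

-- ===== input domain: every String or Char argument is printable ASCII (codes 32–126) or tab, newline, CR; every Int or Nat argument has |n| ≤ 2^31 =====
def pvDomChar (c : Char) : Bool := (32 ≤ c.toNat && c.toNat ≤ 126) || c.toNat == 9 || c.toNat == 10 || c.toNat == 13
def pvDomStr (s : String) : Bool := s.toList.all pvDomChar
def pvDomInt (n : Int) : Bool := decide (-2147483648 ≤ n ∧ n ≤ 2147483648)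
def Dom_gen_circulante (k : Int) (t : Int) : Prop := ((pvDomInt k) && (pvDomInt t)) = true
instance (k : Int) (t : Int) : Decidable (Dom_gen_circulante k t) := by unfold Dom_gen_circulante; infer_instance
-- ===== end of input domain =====

-- B computes each rotated element directly from the original k by a closed per-index
-- formula instead of threading a mutated k through a while loop (objective: alternative).

-- ===== PORT A =====
-- the loop body's update of k, verbatim: if k & 1 == 1: k = k >> 1; s = 1 << n; k = k ^ s
-- else: k = k >> 1.  'n' is t-1; '(t-1).toNat' is exact because the body only runs when
-- 1 ≤ i < t, so t - 1 ≥ 1 (Python would raise on a negative shift, which is unreachable).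
def gen_circulante_step (t k : Int) : Int :=
  if PySem.Int.band k 1 = 1 then
    PySem.Int.bxor (k >>> (1 : Nat)) ((1 : Int) <<< (t - 1).toNat)
  else
    k >>> (1 : Nat)

-- the while loop: state (k, i, l); 'l[i] = k' is List.set (i ≥ 1 throughout, so i.toNat exact)
def gen_circulante_loop (t k i : Int) (l : List Int) : List Int :=
  if i < t then
    let k' := gen_circulante_step t k
    gen_circulante_loop t k' (i + 1) (l.set i.toNat k')
  else l
termination_by (t - i).toNat
decreasing_by omega

def gen_circulante (k : Int) (t : Int) : List Int :=
  gen_circulante_loop t k 1 ([k] ++ List.replicate (t - 1).toNat 0)  -- [k] + [0]*(t-1)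

-- ===== PORT B =====
-- [k] + [(k >> i) ^ ((k & ((1 << i) - 1)) << (t - i)) for i in range(1, t)]
-- (i.toNat and (t-i).toNat are exact: 1 ≤ i < t inside the range)
-- the comprehension's per-element expression: (k >> i) ^ ((k & ((1 << i) - 1)) << (t - i))
def gen_circulante_alt_elem (k t i : Int) : Int :=
  PySem.Int.bxor (k >>> i.toNat)
    ((PySem.Int.band k (((1:Int) <<< i.toNat) - 1)) <<< (t - i).toNat)

def gen_circulante_alt (k : Int) (t : Int) : List Int :=
  [k] ++ (PySem.List.pyRange 1 t).map (gen_circulante_alt_elem k t)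

-- ===== PRECONDITION & SPEC =====
def Spec_gen_circulante (k : Int) (t : Int) (out : List Int) : Prop := out = gen_circulante_alt k t
instance (k : Int) (t : Int) (out : List Int) : Decidable (Spec_gen_circulante k t out) := by unfold Spec_gen_circulante; infer_instance

-- ===== CLAIM (what is proved, stated in full; the proofs are below) =====
def Claim_equal_gen_circulante : Prop := ∀ (k : Int) (t : Int), Dom_gen_circulante k t → Spec_gen_circulante k t (gen_circulante k t)

-- ===== LEMMAS AND PROOFS =====

-- ---------- bit-level toolkit (Int.testBit) ----------

theorem neg_cast_sub_one (X : Nat) : (-(X : Int) - 1) = Int.negSucc X := by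
  rw [Int.negSucc_eq]; ring

theorem tb_ofNat (n : Nat) (i : Nat) : (Int.ofNat n).testBit i = n.testBit i := rfl
theorem tb_negSucc (n : Nat) (i : Nat) : (Int.negSucc n).testBit i = !n.testBit i := rfl
theorem sr_ofNat (n s : Nat) : (Int.ofNat n) >>> s = Int.ofNat (n >>> s) := rfl
theorem sr_negSucc (n s : Nat) : (Int.negSucc n) >>> s = Int.negSucc (n >>> s) := rfl
theorem sl_ofNat (n s : Nat) : (Int.ofNat n) <<< s = Int.ofNat (n <<< s) := rfl

theorem tb_cast (n : Nat) (i : Nat) : ((n : Int)).testBit i = n.testBit i := rfl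
theorem ofNat_cast (n : Nat) : Int.ofNat n = (n : Int) := rfl

theorem tb_ext {x y : Int} (h : ∀ i, x.testBit i = y.testBit i) : x = y := by
  cases x with
  | ofNat m =>
    cases y with
    | ofNat n =>
      have : m = n := Nat.eq_of_testBit_eq (fun i => by simpa [Int.testBit] using h i)
      simp [this]
    | negSucc n =>
      have hm : m < 2 ^ (m + n) :=
        lt_of_lt_of_le Nat.lt_two_pow_self (Nat.pow_le_pow_right (by norm_num) (by omega))
      have hn : n < 2 ^ (m + n) :=
        lt_of_lt_of_le Nat.lt_two_pow_self (Nat.pow_le_pow_right (by norm_num) (by omega))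
      have := h (m + n)
      simp [Int.testBit, Nat.testBit_lt_two_pow hm, Nat.testBit_lt_two_pow hn] at this
  | negSucc m =>
    cases y with
    | ofNat n =>
      have hm : m < 2 ^ (m + n) :=
        lt_of_lt_of_le Nat.lt_two_pow_self (Nat.pow_le_pow_right (by norm_num) (by omega))
      have hn : n < 2 ^ (m + n) :=
        lt_of_lt_of_le Nat.lt_two_pow_self (Nat.pow_le_pow_right (by norm_num) (by omega))
      have := h (m + n)
      simp [Int.testBit, Nat.testBit_lt_two_pow hm, Nat.testBit_lt_two_pow hn] at this
    | negSucc n =>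
      have : m = n := Nat.eq_of_testBit_eq (fun i => by
        have := h i
        simpa [Int.testBit] using this)
      simp [this]

theorem tb_shiftRight (x : Int) (s i : Nat) : (x >>> s).testBit i = x.testBit (s + i) := by
  cases x with
  | ofNat n => rw [sr_ofNat, tb_ofNat, tb_ofNat, Nat.testBit_shiftRight]
  | negSucc n => rw [sr_negSucc, tb_negSucc, tb_negSucc, Nat.testBit_shiftRight]

theorem tb_shiftLeft_nonneg (x : Int) (hx : 0 ≤ x) (s i : Nat) :
    (x <<< s).testBit i = (decide (s ≤ i) && x.testBit (i - s)) := by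
  obtain ⟨n, rfl⟩ := Int.eq_ofNat_of_zero_le hx
  rw [show ((n : Int) = Int.ofNat n) from rfl, sl_ofNat, tb_ofNat, tb_ofNat,
    Nat.testBit_shiftLeft]

theorem negSucc_arith (n : Nat) : -(Int.negSucc n) - 1 = (n : Int) := by
  rw [Int.negSucc_eq]; ring

theorem tb_bxor (a b : Int) (i : Nat) :
    (PySem.Int.bxor a b).testBit i = xor (a.testBit i) (b.testBit i) := by
  cases a with
  | ofNat m =>
    cases b with
    | ofNat n =>
      simp [PySem.Int.bxor, tb_cast, Nat.testBit_xor]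
    | negSucc n =>
      have hb : ¬ (0 : Int) ≤ Int.negSucc n := by simp [Int.negSucc_eq]; omega
      simp [PySem.Int.bxor, hb, neg_cast_sub_one, tb_cast, tb_negSucc, Nat.testBit_xor]
  | negSucc m =>
    have ha : ¬ (0 : Int) ≤ Int.negSucc m := by simp [Int.negSucc_eq]; omega
    cases b with
    | ofNat n =>
      simp [PySem.Int.bxor, ha, neg_cast_sub_one, tb_cast, tb_negSucc, Nat.testBit_xor]
    | negSucc n =>
      simp [PySem.Int.bxor, ha, tb_cast, tb_negSucc, Nat.testBit_xor]

theorem compl_testBit : ∀ (j r i : Nat), r < 2 ^ j →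
    (2 ^ j - 1 - r).testBit i = (decide (i < j) && !r.testBit i) := by
  intro j
  induction j with
  | zero => intro r i h; interval_cases r; simp
  | succ j ih =>
    intro r i h
    have hP : 0 < 2 ^ j := Nat.two_pow_pos j
    cases i with
    | zero =>
      rw [Nat.testBit_zero, Nat.testBit_zero, pow_succ] at *
      have : (2 ^ j * 2 - 1 - r) % 2 = 1 ↔ ¬ (r % 2 = 1) := by omega
      simp only [← decide_not]
      simpa using this
    | succ i =>
      rw [Nat.testBit_succ, Nat.testBit_succ]
      have hv : (2 ^ (j + 1) - 1 - r) / 2 = 2 ^ j - 1 - r / 2 := by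
        rw [pow_succ] at *; omega
      rw [hv, ih (r / 2) i (by rw [pow_succ] at h; omega)]
      simp

theorem mask_cast (j : Nat) : ((1 : Int) <<< j) - 1 = (((2 ^ j - 1 : Nat)) : Int) := by
  rw [show ((1 : Int) = Int.ofNat 1) from rfl, sl_ofNat]
  have h1 : (1 : Nat) <<< j = 2 ^ j := by rw [Nat.shiftLeft_eq]; ring
  rw [h1, ofNat_cast, Nat.cast_sub Nat.one_le_two_pow, Nat.cast_one]
  norm_num

theorem tb_band_mask (k : Int) (j i : Nat) :
    (PySem.Int.band k (((1:Int) <<< j) - 1)).testBit i = (decide (i < j) && k.testBit i) := by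
  rw [mask_cast]
  have hmt : ((2 ^ j - 1 : Nat) : Int).toNat = 2 ^ j - 1 := by omega
  cases k with
  | ofNat n =>
    rw [ofNat_cast, PySem.Int.band_of_nonneg (Int.natCast_nonneg n) (Int.natCast_nonneg _),
      Int.toNat_natCast, hmt, tb_cast, tb_cast, Nat.testBit_and,
      Nat.testBit_two_pow_sub_one, Bool.and_comm]
  | negSucc n =>
    have ha : ¬ (0 : Int) ≤ Int.negSucc n := by simp [Int.negSucc_eq]; omega
    rw [PySem.Int.band]
    simp only [ha, if_false, if_pos (show (0:Int) ≤ ((2 ^ j - 1 : Nat) : Int) from Int.natCast_nonneg _)]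
    rw [negSucc_arith]
    have h2 : ((n : Int)).toNat = n := by omega
    rw [hmt, h2, tb_cast]
    have hand : (2 ^ j - 1) &&& n = n % 2 ^ j := by
      rw [Nat.land_comm, Nat.and_two_pow_sub_one_eq_mod]
    rw [hand, compl_testBit j (n % 2 ^ j) i (Nat.mod_lt _ (Nat.two_pow_pos j)),
      Nat.testBit_mod_two_pow, tb_negSucc]
    cases Nat.decLt i j with
    | isTrue h => simp [h]
    | isFalse h => simp [h]

theorem band_mask_nonneg (k : Int) (j : Nat) : 0 ≤ PySem.Int.band k (((1:Int) <<< j) - 1) := by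
  rw [mask_cast]
  exact PySem.Int.band_comm k _ ▸ PySem.Int.band_nonneg_of_nonneg_left k (by positivity)

theorem tb_one_shift (s i : Nat) : ((1 : Int) <<< s).testBit i = decide (s = i) := by
  rw [show ((1 : Int) = Int.ofNat 1) from rfl, sl_ofNat, tb_ofNat]
  have h1 : (1 : Nat) <<< s = 2 ^ s := by rw [Nat.shiftLeft_eq]; ring
  rw [h1, Nat.testBit_two_pow]

theorem band_one_iff (k : Int) : PySem.Int.band k 1 = 1 ↔ k.testBit 0 = true := by
  cases k with
  | ofNat n =>
    rw [ofNat_cast, PySem.Int.band_of_nonneg (Int.natCast_nonneg n) (by norm_num),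
      tb_cast, Nat.testBit_zero]
    rw [show ((1 : Int)).toNat = 1 from rfl, Int.toNat_natCast, Nat.and_one_is_mod]
    simp only [decide_eq_true_eq]
    omega
  | negSucc n =>
    have ha : ¬ (0 : Int) ≤ Int.negSucc n := by simp [Int.negSucc_eq]; omega
    rw [PySem.Int.band]
    simp only [ha, if_false, if_pos (show (0:Int) ≤ (1:Int) by norm_num)]
    rw [negSucc_arith, show ((1 : Int)).toNat = 1 from rfl, Int.toNat_natCast,
      tb_negSucc, Nat.testBit_zero, Nat.one_and_eq_mod_two]
    simp only [Bool.not_eq_eq_eq_not, Bool.not_true, decide_eq_false_iff_not]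
    omega

-- ---------- the key identity: one loop step advances the closed form ----------

theorem shiftRight_zero_int (x : Int) : x >>> (0 : Nat) = x := by
  cases x with
  | ofNat n => rw [sr_ofNat, Nat.shiftRight_zero]
  | negSucc n => rw [sr_negSucc, Nat.shiftRight_zero]

theorem g_zero (k t : Int) : gen_circulante_alt_elem k t 0 = k := by
  rw [gen_circulante_alt_elem]
  have h1 : ((1:Int) <<< ((0:Int)).toNat) - 1 = 0 := rfl
  rw [h1, PySem.Int.band_zero]
  have h2 : (0 : Int) <<< (t - 0).toNat = 0 := by
    rw [show ((0:Int) = Int.ofNat 0) from rfl, sl_ofNat, Nat.zero_shiftLeft]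
  rw [h2, PySem.Int.bxor_zero, show Int.toNat 0 = 0 from rfl, shiftRight_zero_int]

theorem tb_gfun (k t i : Int) (b : Nat) :
    (gen_circulante_alt_elem k t i).testBit b =
      xor (k.testBit (i.toNat + b))
        (decide ((t - i).toNat ≤ b) && (decide (b - (t - i).toNat < i.toNat) &&
          k.testBit (b - (t - i).toNat))) := by
  rw [gen_circulante_alt_elem, tb_bxor, tb_shiftRight,
    tb_shiftLeft_nonneg _ (band_mask_nonneg k i.toNat), tb_band_mask]

theorem step_g (k t j : Int) (h0 : 0 ≤ j) (h2 : j + 1 < t) :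
    gen_circulante_step t (gen_circulante_alt_elem k t j) = gen_circulante_alt_elem k t (j + 1) := by
  have hD : 2 ≤ (t - j).toNat := by omega
  have eJ1 : ((j + 1)).toNat = j.toNat + 1 := by omega
  have eD1 : (t - (j + 1)).toNat = (t - j).toNat - 1 := by omega
  have eT1 : (t - 1).toNat = (t - j).toNat + j.toNat - 1 := by omega
  have hcond : (PySem.Int.band (gen_circulante_alt_elem k t j) 1 = 1) ↔
      k.testBit j.toNat = true := by
    rw [band_one_iff, tb_gfun]
    simp [show ¬ ((t - j).toNat ≤ 0) by omega]
  rw [gen_circulante_step]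
  by_cases hk : k.testBit j.toNat = true
  · rw [if_pos (hcond.mpr hk)]
    apply tb_ext; intro b
    rw [tb_bxor, tb_shiftRight, tb_gfun, tb_one_shift, tb_gfun, eJ1, eD1, eT1]
    have eX : j.toNat + (1 + b) = j.toNat + 1 + b := by omega
    have eC : 1 + b - (t - j).toNat = b - ((t - j).toNat - 1) := by omega
    have hDe : decide ((t - j).toNat ≤ 1 + b) = decide ((t - j).toNat - 1 ≤ b) := by
      simp only [decide_eq_decide]; omega
    rw [eX, eC, hDe]
    by_cases hb : (t - j).toNat + j.toNat - 1 = b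
    · have hc : b - ((t - j).toNat - 1) = j.toNat := by omega
      rw [hc, decide_eq_true hb, decide_eq_true (show (t - j).toNat - 1 ≤ b by omega),
        decide_eq_false (show ¬ (j.toNat < j.toNat) by omega),
        decide_eq_true (show j.toNat < j.toNat + 1 by omega), hk]
      cases k.testBit (j.toNat + 1 + b) <;> rfl
    · rw [decide_eq_false hb, Bool.xor_false]
      by_cases h1 : (t - j).toNat - 1 ≤ b
      · have : decide (b - ((t - j).toNat - 1) < j.toNat + 1)
            = decide (b - ((t - j).toNat - 1) < j.toNat) := by
          simp only [decide_eq_decide]; omega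
        rw [this]
      · rw [decide_eq_false h1]; simp
  · rw [if_neg (fun h => hk (hcond.mp h))]
    apply tb_ext; intro b
    rw [tb_shiftRight, tb_gfun, tb_gfun, eJ1, eD1]
    have eX : j.toNat + (1 + b) = j.toNat + 1 + b := by omega
    have eC : 1 + b - (t - j).toNat = b - ((t - j).toNat - 1) := by omega
    have hDe : decide ((t - j).toNat ≤ 1 + b) = decide ((t - j).toNat - 1 ≤ b) := by
      simp only [decide_eq_decide]; omega
    rw [eX, eC, hDe]
    have hkf : k.testBit j.toNat = false := by
      revert hk; cases k.testBit j.toNat <;> simp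
    by_cases h2' : b - ((t - j).toNat - 1) = j.toNat
    · rw [h2', hkf]; simp
    · have : decide (b - ((t - j).toNat - 1) < j.toNat + 1)
          = decide (b - ((t - j).toNat - 1) < j.toNat) := by
        simp only [decide_eq_decide]; omega
      rw [this]

-- ---------- list bookkeeping ----------

theorem take_set (l : List Int) (n : Nat) (x : Int) (h : n < l.length) :
    (l.set n x).take (n + 1) = l.take n ++ [x] := by
  induction l generalizing n with
  | nil => simp at h
  | cons a l ih =>
    cases n with
    | zero => simp
    | succ n =>
      simp only [List.set_cons_succ, List.take_succ_cons, List.cons_append]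
      rw [ih n (by simpa using h)]

theorem loop_eq : ∀ (m : Nat) (t k0 cur i : Int) (l : List Int),
    (t - i).toNat = m → 1 ≤ i → i ≤ t → l.length = t.toNat →
    cur = gen_circulante_alt_elem k0 t (i - 1) →
    gen_circulante_loop t cur i l =
      l.take i.toNat ++ (PySem.List.pyRange i t).map (gen_circulante_alt_elem k0 t) := by
  intro m
  induction m with
  | zero =>
    intro t k0 cur i l hm h1 hle hlen hcur
    have hit : i = t := by omega
    rw [gen_circulante_loop, if_neg (by omega)]
    have : PySem.List.pyRange i t = [] := by
      rw [PySem.List.pyRange_one, show (t - i).toNat = 0 from hm, List.range_zero, List.map_nil]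
    rw [this, List.map_nil, List.append_nil, List.take_of_length_le (by omega)]
  | succ m ih =>
    intro t k0 cur i l hm h1 hle hlen hcur
    have hit : i < t := by omega
    rw [gen_circulante_loop, if_pos hit]
    have hstep : gen_circulante_step t cur = gen_circulante_alt_elem k0 t i := by
      rw [hcur]
      have := step_g k0 t (i - 1) (by omega) (by omega)
      simpa using this
    simp only [hstep]
    rw [ih t k0 (gen_circulante_alt_elem k0 t i) (i + 1) (l.set i.toNat (gen_circulante_alt_elem k0 t i))
      (by omega) (by omega) (by omega) (by simpa using hlen) (by norm_num)]
    have hi1 : ((i + 1)).toNat = i.toNat + 1 := by omega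
    rw [hi1, take_set l i.toNat _ (by omega), PySem.List.pyRange_one_cons hit, List.map_cons]
    simp

-- ===== VERDICT (by name: the statement is the Claim_ definition above) =====
theorem gen_circulante_spec : Claim_equal_gen_circulante := by
  intro k t _
  unfold Spec_gen_circulante
  show gen_circulante k t = gen_circulante_alt k t
  rw [gen_circulante, gen_circulante_alt]
  by_cases ht : 1 < t
  · rw [loop_eq (t - 1).toNat t k k 1 _ (by omega) (by omega) (by omega)
      (by simp; omega) (by norm_num [g_zero])]
    simp
  · rw [gen_circulante_loop, if_neg (by omega)]
    have h0 : (t - 1).toNat = 0 := by omega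
    rw [h0, List.replicate_zero, List.append_nil]
    have : PySem.List.pyRange 1 t = [] := by
      rw [PySem.List.pyRange_one, show (t - 1).toNat = 0 from h0, List.range_zero, List.map_nil]
    rw [this, List.map_nil, List.append_nil]
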